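-- pv_equiv track=rewrite | github.com/allan-tulane/sp25-assignment-01-zevgaslin | main.py | longest_run_recursiveCalc
-- ===== SOURCE A (Python) =====
-- def longest_run_recursiveCalc(mylist, key):
--     if len(mylist) == 0:
--         return (0, 0, 0)
--
--     if len(mylist) == 1:
--         if mylist[0] == key:
--             return (1, 1, 1)
--         else:
--             return (0, 0, 0)
--
--     middle = len(mylist) // 2
--     Lmax = longest_run_recursiveCalc(mylist[:middle], key)
--     Rmax = longest_run_recursiveCalc(mylist[middle:], key)
--
--     if Lmax[0] != middle:
--         left = Lmax[0]
--     else: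
--         left = Lmax[0] + Rmax[0]
--
--     if Rmax[1] != len(mylist) - middle:
--         right = Rmax[1]
--     else:
--         right = Rmax[1] + Lmax[1]
--
--     midMax = Lmax[1] + Rmax[0]
--
--     max_length = max(Lmax[2], Rmax[2], midMax)
--
--     return (left, right, max_length)
-- ===== SOURCE B (Python) =====
-- def longest_run_recursiveCalc(mylist, key):
--     cur = 0
--     mx = 0
--     for x in mylist:
--         cur = cur + 1 if x == key else 0
--         if cur > mx:
--             mx = cur
--     prefix = 0
--     for x in mylist:
--         if x == key:
--             prefix += 1
--         else:
--             break
--     return (prefix, cur, mx)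
-- ===== Notes on version B (the rewrite author's own statement) =====
-- stated objective: faster
-- what changed: Replaces the divide-and-conquer recursion over list slices with a single left-to-right fold tracking current/max run plus a short prefix scan.
import Mathlib
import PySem

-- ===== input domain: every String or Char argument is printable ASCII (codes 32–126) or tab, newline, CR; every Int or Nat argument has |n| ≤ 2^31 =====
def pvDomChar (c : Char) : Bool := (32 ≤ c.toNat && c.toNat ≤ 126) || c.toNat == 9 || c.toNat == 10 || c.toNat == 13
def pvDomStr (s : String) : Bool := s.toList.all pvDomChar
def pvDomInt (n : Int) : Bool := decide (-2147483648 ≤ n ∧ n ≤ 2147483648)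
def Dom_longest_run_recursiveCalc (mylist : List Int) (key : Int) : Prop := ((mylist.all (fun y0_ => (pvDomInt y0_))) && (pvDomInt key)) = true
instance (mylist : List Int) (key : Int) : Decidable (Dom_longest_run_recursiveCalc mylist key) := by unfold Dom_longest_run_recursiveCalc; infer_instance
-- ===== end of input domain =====

-- B replaces A's divide-and-conquer over list slices by one left-to-right fold (current/max run) plus a prefix scan.

-- ===== PORT A =====
-- Literal port of A: 'mylist[:middle]' / 'mylist[middle:]' with 0 ≤ middle ≤ len are exactly take/drop,
-- 'len(mylist) // 2' on the Nat length is exactly Python's floor division, and 'mylist[0]' under the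
-- 'len == 1' guard is exactly headI.
def longest_run_recursiveCalc (mylist : List Int) (key : Int) : Int × Int × Int :=
  if mylist.length = 0 then (0, 0, 0)
  else if mylist.length = 1 then
    (if mylist.headI = key then (1, 1, 1) else (0, 0, 0))
  else
    let middle := mylist.length / 2
    let Lmax := longest_run_recursiveCalc (mylist.take middle) key
    let Rmax := longest_run_recursiveCalc (mylist.drop middle) key
    let left := if Lmax.1 ≠ (middle : Int) then Lmax.1 else Lmax.1 + Rmax.1
    let right := if Rmax.2.1 ≠ ((mylist.length - middle : Nat) : Int) then Rmax.2.1 else Rmax.2.1 + Lmax.2.1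
    let midMax := Lmax.2.1 + Rmax.1
    (left, right, max (max Lmax.2.2 Rmax.2.2) midMax)
termination_by mylist.length
decreasing_by
  · simp only [List.length_take]; omega
  · simp only [List.length_drop]; omega

-- ===== PORT B =====
-- the body of B's first loop: cur = cur + 1 if x == key else 0; if cur > mx: mx = cur
def pvStep (key : Int) (s : Int × Int) (x : Int) : Int × Int :=
  let cur := if x = key then s.1 + 1 else 0
  (cur, if cur > s.2 then cur else s.2)

-- B's second loop: count leading elements equal to key, breaking at the first other element
def pvPrefix (mylist : List Int) (key : Int) : Int :=
  match mylist with
  | [] => 0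
  | x :: xs => if x = key then 1 + pvPrefix xs key else 0

def longest_run_recursiveCalc_alt (mylist : List Int) (key : Int) : Int × Int × Int :=
  let s := mylist.foldl (pvStep key) (0, 0)
  (pvPrefix mylist key, s.1, s.2)

-- ===== PRECONDITION & SPEC =====
def Spec_longest_run_recursiveCalc (mylist : List Int) (key : Int) (out : Int × Int × Int) : Prop := out = longest_run_recursiveCalc_alt mylist key
instance (mylist : List Int) (key : Int) (out : Int × Int × Int) : Decidable (Spec_longest_run_recursiveCalc mylist key out) := by unfold Spec_longest_run_recursiveCalc; infer_instance

-- ===== CLAIM (what is proved, stated in full; the proofs are below) =====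
def Claim_equal_longest_run_recursiveCalc : Prop := ∀ (mylist : List Int) (key : Int), Dom_longest_run_recursiveCalc mylist key → Spec_longest_run_recursiveCalc mylist key (longest_run_recursiveCalc mylist key)

-- ===== LEMMAS AND PROOFS =====

-- suffix run length of key (specification helper, used only in the proofs)
def pvSuf (mylist : List Int) (key : Int) : Int :=
  match mylist with
  | [] => 0
  | x :: xs =>
      if pvSuf xs key = (xs.length : Int) then (if x = key then pvSuf xs key + 1 else pvSuf xs key)
      else pvSuf xs key

lemma pvPrefix_bounds (l : List Int) (k : Int) : 0 ≤ pvPrefix l k ∧ pvPrefix l k ≤ (l.length : Int) := by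
  induction l with
  | nil => simp [pvPrefix]
  | cons x xs ih => simp only [pvPrefix, List.length_cons]; split <;> omega

lemma pvSuf_bounds (l : List Int) (k : Int) : 0 ≤ pvSuf l k ∧ pvSuf l k ≤ (l.length : Int) := by
  induction l with
  | nil => simp [pvSuf]
  | cons x xs ih => simp only [pvSuf, List.length_cons]; split_ifs <;> omega

-- the whole list is a run of key iff the prefix run is everything iff the suffix run is everything
lemma pvPref_eq_len_iff (l : List Int) (k : Int) :
    pvPrefix l k = (l.length : Int) ↔ pvSuf l k = (l.length : Int) := by
  induction l with
  | nil => simp [pvPrefix, pvSuf]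
  | cons x xs ih =>
    have hp := pvPrefix_bounds xs k
    have hs := pvSuf_bounds xs k
    simp only [pvPrefix, pvSuf, List.length_cons]
    split_ifs <;> omega

lemma pvPrefix_append (a b : List Int) (k : Int) :
    pvPrefix (a ++ b) k =
      if pvPrefix a k = (a.length : Int) then (a.length : Int) + pvPrefix b k else pvPrefix a k := by
  induction a with
  | nil => simp [pvPrefix]
  | cons x xs ih =>
    have hp := pvPrefix_bounds xs k
    have hpb := pvPrefix_bounds b k
    simp only [List.cons_append, pvPrefix, List.length_cons, ih]
    split_ifs <;> omega

lemma pvSuf_append (a b : List Int) (k : Int) :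
    pvSuf (a ++ b) k =
      if pvSuf b k = (b.length : Int) then (b.length : Int) + pvSuf a k else pvSuf b k := by
  induction a with
  | nil => simp [pvSuf]
  | cons x xs ih =>
    have hsb := pvSuf_bounds b k
    have hsa := pvSuf_bounds xs k
    simp only [List.cons_append, pvSuf, List.length_append, ih]
    split_ifs <;> omega

-- B's fold keeps its current run at most its recorded max
lemma pvFold_fst_le_snd (l : List Int) (k : Int) (c m : Int) (h : c ≤ m) :
    (l.foldl (pvStep k) (c, m)).1 ≤ (l.foldl (pvStep k) (c, m)).2 := by
  induction l generalizing c m with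
  | nil => simpa using h
  | cons x xs ih =>
    simp only [List.foldl_cons, pvStep]
    apply ih
    split <;> split <;> omega

-- full characterisation of B's fold from any state 0 ≤ c ≤ m: the final current run and max run
lemma pvFold_char (l : List Int) (k : Int) (c m : Int) (hc : 0 ≤ c) (hm : c ≤ m) :
    l.foldl (pvStep k) (c, m) =
      ((if pvPrefix l k = (l.length : Int) then c + (l.length : Int) else pvSuf l k),
       max m (max (c + pvPrefix l k) (l.foldl (pvStep k) (0, 0)).2)) := by
  induction l generalizing c m with
  | nil => simp [pvPrefix]; omega
  | cons x xs ih =>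
    have hp := pvPrefix_bounds xs k
    have hs := pvSuf_bounds xs k
    have hiff := pvPref_eq_len_iff xs k
    have h0 := ih 0 0 le_rfl le_rfl
    have hmx : pvPrefix xs k ≤ (List.foldl (pvStep k) (0, 0) xs).2 ∧
        0 ≤ (List.foldl (pvStep k) (0, 0) xs).2 := by
      have := congrArg Prod.snd h0
      simp only at this
      omega
    by_cases hx : x = k
    · simp only [List.foldl_cons, pvStep, if_pos hx, gt_iff_lt]
      have e1 : (if m < c + 1 then c + 1 else m) = max m (c + 1) := by omega
      rw [e1]
      norm_num
      rw [ih (c+1) (max m (c+1)) (by omega) (by omega),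
          ih 1 1 (by omega) (by omega)]
      simp only [pvPrefix, pvSuf, if_pos hx, Prod.mk.injEq]
      constructor
      · split_ifs <;> omega
      · omega
    · simp only [List.foldl_cons, pvStep, if_neg hx, gt_iff_lt]
      have e1 : (if m < (0:Int) then (0:Int) else m) = m := by omega
      have e2 : (if (0:Int) < 0 then (0:Int) else 0) = (0:Int) := by omega
      rw [e1, e2, ih 0 m le_rfl (by omega), ih 0 0 le_rfl le_rfl]
      simp only [pvPrefix, pvSuf, if_neg hx, List.length_cons, Prod.mk.injEq]
      constructor
      · split_ifs <;> omega
      · omega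

-- B returns (prefix run, suffix run, max run)
lemma alt_eq (l : List Int) (k : Int) :
    longest_run_recursiveCalc_alt l k = (pvPrefix l k, pvSuf l k, (l.foldl (pvStep k) (0, 0)).2) := by
  have h := pvFold_char l k 0 0 le_rfl le_rfl
  have hiff := pvPref_eq_len_iff l k
  have hs := pvSuf_bounds l k
  have h1 : (l.foldl (pvStep k) (0, 0)).1 = pvSuf l k := by
    rw [h]
    simp only
    split_ifs with hpl
    · omega
    · rfl
  unfold longest_run_recursiveCalc_alt
  simp only
  rw [h1]

-- A returns the same triple
lemma a_eq (l : List Int) (k : Int) :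
    longest_run_recursiveCalc l k = (pvPrefix l k, pvSuf l k, (l.foldl (pvStep k) (0, 0)).2) := by
  induction l using longest_run_recursiveCalc.induct (key := k) with
  | case1 l h0 =>
    rw [List.length_eq_zero_iff] at h0
    subst h0
    simp [longest_run_recursiveCalc, pvPrefix, pvSuf]
  | case2 l h0 h1 hh =>
    obtain ⟨x, rfl⟩ := List.length_eq_one_iff.mp h1
    simp only [List.headI] at hh
    simp [longest_run_recursiveCalc, pvPrefix, pvSuf, pvStep, hh]
  | case3 l h0 h1 hh =>
    obtain ⟨x, rfl⟩ := List.length_eq_one_iff.mp h1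
    simp only [List.headI] at hh
    simp [longest_run_recursiveCalc, pvPrefix, pvSuf, pvStep, hh]
  | case4 l h0 h1 middle ihL ihR =>
    have hlen : 2 ≤ l.length := by omega
    have hsplit : l = l.take (l.length / 2) ++ l.drop (l.length / 2) := (List.take_append_drop _ l).symm
    set a := l.take (l.length / 2) with ha
    set b := l.drop (l.length / 2) with hb
    have hla : a.length = l.length / 2 := by rw [ha, List.length_take]; omega
    have hlb : b.length = l.length - l.length / 2 := by rw [hb, List.length_drop]
    have hPa := pvPrefix_bounds a k
    have hPb := pvPrefix_bounds b k
    have hSa := pvSuf_bounds a k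
    have hSb := pvSuf_bounds b k
    have hiffa := pvPref_eq_len_iff a k
    have hFa := pvFold_char a k 0 0 le_rfl le_rfl
    have hsa_eq : (a.foldl (pvStep k) (0, 0)).1 = pvSuf a k := by
      rw [hFa]
      simp only
      split_ifs with h
      · omega
      · rfl
    have hma : pvSuf a k ≤ (a.foldl (pvStep k) (0, 0)).2 := by
      have := pvFold_fst_le_snd a k 0 0 le_rfl
      omega
    have hFapp : l.foldl (pvStep k) (0, 0) = b.foldl (pvStep k) (a.foldl (pvStep k) (0, 0)) := by
      conv_lhs => rw [hsplit]
      exact List.foldl_append ..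
    have hFb := pvFold_char b k (a.foldl (pvStep k) (0, 0)).1 (a.foldl (pvStep k) (0, 0)).2
      (by rw [hsa_eq]; omega) (pvFold_fst_le_snd a k 0 0 le_rfl)
    rw [longest_run_recursiveCalc]
    simp only [if_neg h0, if_neg h1]
    rw [← ha, ← hb]
    rw [ihL, ihR]
    have hprefl : pvPrefix l k = if pvPrefix a k = ((l.length / 2 : Nat) : Int)
        then ((l.length / 2 : Nat) : Int) + pvPrefix b k else pvPrefix a k := by
      conv_lhs => rw [hsplit]
      rw [pvPrefix_append, hla]
    have hsufl : pvSuf l k = if pvSuf b k = ((l.length - l.length / 2 : Nat) : Int)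
        then ((l.length - l.length / 2 : Nat) : Int) + pvSuf a k else pvSuf b k := by
      conv_lhs => rw [hsplit]
      rw [pvSuf_append, hlb]
    have hmxl : (l.foldl (pvStep k) (0, 0)).2 =
        max (a.foldl (pvStep k) (0, 0)).2
          (max (pvSuf a k + pvPrefix b k) (b.foldl (pvStep k) (0, 0)).2) := by
      rw [hFapp, hFb, hsa_eq]
    simp only [Prod.mk.injEq]
    refine ⟨?_, ?_, ?_⟩
    · rw [hprefl]; split_ifs <;> omega
    · rw [hsufl]; split_ifs <;> omega
    · rw [hmxl]; omega

-- ===== VERDICT (by name: the statement is the Claim_ definition above) =====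
theorem longest_run_recursiveCalc_spec : Claim_equal_longest_run_recursiveCalc := by
  intro l k _
  unfold Spec_longest_run_recursiveCalc
  rw [a_eq, alt_eq]
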